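-- pv_equiv track=rewrite | github.com/MrBrantCode/unitest_baseline | mut_generate/mist_train_cf/cf_93023/solution.py | compare_string_lengths
-- ===== SOURCE A (Python) =====
-- def compare_string_lengths(str1, str2):
--     """
--     This function compares the lengths of two input strings without using built-in length functions.
--     It then returns the longer string.
--
--     Parameters:
--     str1 (str): The first input string.
--     str2 (str): The second input string.
--
--     Returns:
--     str: The longer string.
--     """
--     # Initialize variables to keep track of the length of each string
--     len1 = 0
--     len2 = 0
--
--     # Iterate over the characters in the first string
--     for char in str1:
--         # Increment the length counter
--         len1 += 1
--
--     # Iterate over the characters in the second string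
--     for char in str2:
--         # Increment the length counter
--         len2 += 1
--
--     # Compare the lengths of the two strings
--     if len1 >= len2:
--         return str1
--     else:
--         return str2
-- ===== SOURCE B (Python) =====
-- def compare_string_lengths(str1, str2):
--     return str1 if len(str1) >= len(str2) else str2
-- ===== Notes on version B (the rewrite author's own statement) =====
-- stated objective: idiomatic
-- what changed: Replaced the two character-counting loops with a direct closed-form comparison of built-in lengths; B maintains no counters and performs no iteration.
import Mathlib
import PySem

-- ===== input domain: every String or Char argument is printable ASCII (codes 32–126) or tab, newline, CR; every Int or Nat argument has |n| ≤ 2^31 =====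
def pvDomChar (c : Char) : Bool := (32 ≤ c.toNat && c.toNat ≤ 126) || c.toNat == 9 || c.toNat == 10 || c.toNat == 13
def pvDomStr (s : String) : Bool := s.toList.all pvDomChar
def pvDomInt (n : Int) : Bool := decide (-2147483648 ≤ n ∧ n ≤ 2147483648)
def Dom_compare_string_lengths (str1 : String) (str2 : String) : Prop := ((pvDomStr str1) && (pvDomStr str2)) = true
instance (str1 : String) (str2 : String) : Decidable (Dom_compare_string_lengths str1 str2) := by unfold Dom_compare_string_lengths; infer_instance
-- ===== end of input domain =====

-- B drops A's two character-counting loops and compares built-in lengths directly (idiomatic).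

-- ===== PORT A =====
-- literal port: count characters of each string by folding, then compare the counters
def compare_string_lengths (str1 : String) (str2 : String) : String :=
  let len1 : Int := str1.toList.foldl (fun acc _ => acc + 1) 0
  let len2 : Int := str2.toList.foldl (fun acc _ => acc + 1) 0
  if len1 ≥ len2 then str1 else str2

-- ===== PORT B =====
def compare_string_lengths_alt (str1 : String) (str2 : String) : String :=
  if PySem.Str.len str1 ≥ PySem.Str.len str2 then str1 else str2

-- ===== PRECONDITION & SPEC =====
def Spec_compare_string_lengths (str1 : String) (str2 : String) (out : String) : Prop := out = compare_string_lengths_alt str1 str2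
instance (str1 : String) (str2 : String) (out : String) : Decidable (Spec_compare_string_lengths str1 str2 out) := by unfold Spec_compare_string_lengths; infer_instance

-- ===== CLAIM (what is proved, stated in full; the proofs are below) =====
def Claim_equal_compare_string_lengths : Prop := ∀ (str1 : String) (str2 : String), Dom_compare_string_lengths str1 str2 → Spec_compare_string_lengths str1 str2 (compare_string_lengths str1 str2)

-- ===== LEMMAS AND PROOFS =====
theorem pv_count_fold (l : List Char) (a : Int) : l.foldl (fun acc _ => acc + 1) a = a + l.length := by
  induction l generalizing a with
  | nil => simp
  | cons c t ih => simp [List.foldl, ih]; ring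

-- ===== VERDICT (by name: the statement is the Claim_ definition above) =====
theorem compare_string_lengths_spec : Claim_equal_compare_string_lengths := by
  intro str1 str2 _
  unfold Spec_compare_string_lengths compare_string_lengths compare_string_lengths_alt
  simp [pv_count_fold, PySem.Str.len]
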